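-- pv_equiv track=rewrite | github.com/brucefeng10/TP_crew_shift | src/crew_scheduling.py | shift_type_compose
-- ===== SOURCE A (Python) =====
-- def shift_type_compose(shift_type_dict):
--     """Get the shifts of each shift type.
--     shift_type_dict: {shift_id: shift_type_id}
--     shift_type_compo: {shift_type_id: [shift_id1, shift_id2, ...]}"""
--
--     shift_type_compo = dict()
--     for k, v in shift_type_dict.items():
--         if v in shift_type_compo:
--             shift_type_compo[v].append(k)
--         else:
--             shift_type_compo[v] = [k]
--     return shift_type_compo
-- ===== SOURCE B (Python) =====
-- def shift_type_compose(shift_type_dict):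
--     """Get the shifts of each shift type.
--     shift_type_dict: {shift_id: shift_type_id}
--     shift_type_compo: {shift_type_id: [shift_id1, shift_id2, ...]}"""
--     items = list(shift_type_dict.items())
--     types = list(dict.fromkeys(t for _, t in items))
--     return {t: [k for k, v in items if v == t] for t in types}
-- ===== Notes on version B (the rewrite author's own statement) =====
-- stated objective: alternative
-- what changed: Replaces the single-pass incremental dict accumulation (grow-or-append per item) with a two-phase plan: first dedup the shift types in first-occurrence order, then build each group by one filter pass over the items per type.
import Mathlib
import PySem

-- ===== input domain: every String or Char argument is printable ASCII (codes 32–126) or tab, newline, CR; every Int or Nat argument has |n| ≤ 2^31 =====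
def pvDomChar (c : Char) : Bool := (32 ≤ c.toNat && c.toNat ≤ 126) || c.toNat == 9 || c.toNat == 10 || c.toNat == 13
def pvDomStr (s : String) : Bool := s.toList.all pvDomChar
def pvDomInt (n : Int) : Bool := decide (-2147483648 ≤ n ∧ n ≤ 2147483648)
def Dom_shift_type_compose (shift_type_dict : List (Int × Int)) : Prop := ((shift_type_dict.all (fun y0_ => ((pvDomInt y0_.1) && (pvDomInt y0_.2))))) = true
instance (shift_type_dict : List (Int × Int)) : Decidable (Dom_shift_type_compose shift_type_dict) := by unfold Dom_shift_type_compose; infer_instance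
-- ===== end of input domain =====

-- B replaces A's single-pass incremental dict accumulation with a dedup-the-types-then-filter-per-type
-- two-phase plan (alternative decomposition, similar cost; not claimed faster).


-- ===== PORT A =====
def shift_type_compose (shift_type_dict : List (Int × Int)) : List (Int × List Int) :=
  (shift_type_dict.foldl
    (fun (d : PySem.Dict Int (List Int)) (p : Int × Int) =>
      if d.contains p.2 then d.modify p.2 [] (fun xs => xs ++ [p.1])
      else d.insert p.2 [p.1])
    PySem.Dict.empty).items

-- ===== PORT B =====
def shift_type_compose_alt (shift_type_dict : List (Int × Int)) : List (Int × List Int) :=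
  (PySem.List.dedup (shift_type_dict.map (fun p => p.2))).map
    (fun t => (t, (shift_type_dict.filter (fun p => p.2 == t)).map (fun p => p.1)))

-- ===== PRECONDITION & SPEC =====
def Spec_shift_type_compose (shift_type_dict : List (Int × Int)) (out : List (Int × List Int)) : Prop := out = shift_type_compose_alt shift_type_dict
instance (shift_type_dict : List (Int × Int)) (out : List (Int × List Int)) : Decidable (Spec_shift_type_compose shift_type_dict out) := by unfold Spec_shift_type_compose; infer_instance

-- ===== CLAIM (what is proved, stated in full; the proofs are below) =====
def Claim_equal_shift_type_compose : Prop := ∀ (shift_type_dict : List (Int × Int)), Dom_shift_type_compose shift_type_dict → Spec_shift_type_compose shift_type_dict (shift_type_compose shift_type_dict)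

-- ===== LEMMAS AND PROOFS =====
-- the A-side loop body, named for the proofs below
def pvStep (d : PySem.Dict Int (List Int)) (p : Int × Int) : PySem.Dict Int (List Int) :=
  if d.contains p.2 then d.modify p.2 [] (fun xs => xs ++ [p.1])
  else d.insert p.2 [p.1]

theorem pvDedup_snoc (xs : List Int) (x : Int) :
    PySem.List.dedup (xs ++ [x])
      = if x ∈ xs then PySem.List.dedup xs else PySem.List.dedup xs ++ [x] := by
  have hmem : PySem.Set.contains (PySem.List.dedup xs) x = (x ∈ xs : Bool) := by
    by_cases h : x ∈ xs <;> simp [PySem.Set.contains, h]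
  simp only [PySem.List.dedup, PySem.Set.ofList, List.foldl_append, List.foldl_cons,
    List.foldl_nil, PySem.Set.add]
  rw [show (List.foldl PySem.Set.add PySem.Set.empty xs : PySem.Set Int)
        = PySem.List.dedup xs from rfl, hmem]
  by_cases h : x ∈ xs <;> simp [h]

-- loop invariant: after folding A's loop over l, the dict's item list is exactly B's value on l
theorem pvInv (l : List (Int × Int)) :
    (l.foldl pvStep PySem.Dict.empty).items = shift_type_compose_alt l := by
  induction l using List.reverseRecOn with
  | nil => rfl
  | append_singleton l p ih =>
    obtain ⟨k, v⟩ := p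
    rw [List.foldl_append, List.foldl_cons, List.foldl_nil]
    set d := l.foldl pvStep PySem.Dict.empty with hd
    have hkeys : d.keys = PySem.List.dedup (l.map (fun p => p.2)) := by
      simp [PySem.Dict.keys, ih, shift_type_compose_alt, List.map_map, Function.comp_def]
    have hnodup : d.keys.Nodup := by rw [hkeys]; exact PySem.List.nodup_dedup _
    have hBsnoc : shift_type_compose_alt (l ++ [(k, v)])
        = (PySem.List.dedup (l.map (fun p => p.2) ++ [v])).map
            (fun t => (t, (l.filter (fun p => p.2 == t)).map (fun p => p.1)
                          ++ if v = t then [k] else [])) := by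
      simp only [shift_type_compose_alt, List.filter_append, List.map_append, List.map_cons,
        List.map_nil]
      apply List.map_congr_left
      intro t _
      by_cases hvt : v = t
      · simp [hvt]
      · have hb : (v == t) = false := by simpa using hvt
        simp [List.filter, hb, hvt]
    rw [hBsnoc, pvDedup_snoc]
    by_cases h : v ∈ l.map (fun p => p.2)
    · have hc : d.contains v = true :=
        (PySem.Dict.contains_iff_mem_keys d v).2
          (by rw [hkeys]; exact (PySem.List.mem_dedup _ _).2 h)
      have hgetD : d.getD v [] = (l.filter (fun p => p.2 == v)).map (fun p => p.1) := by
        apply PySem.Dict.getD_of_mem_items d _ hnodup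
        rw [ih]
        exact List.mem_map_of_mem (by rwa [PySem.List.mem_dedup])
      rw [pvStep]
      simp only [hc, if_true, if_pos h]
      rw [show d.modify v [] (fun xs => xs ++ [k])
            = d.insert v ((d.getD v []) ++ [k]) from rfl,
        PySem.Dict.items_insert_of_contains d _ hc, ih]
      simp only [shift_type_compose_alt, List.map_map]
      apply List.map_congr_left
      intro t _
      by_cases hvt : t = v
      · subst hvt; simp [hgetD]
      · have hb : (t == v) = false := by simpa using hvt
        simp only [Function.comp_apply, hb, Bool.false_eq_true, if_false,
          if_neg (fun hh : v = t => hvt hh.symm), List.append_nil]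
    · have hc : d.contains v = false := by
        by_contra hne
        have := (PySem.Dict.contains_iff_mem_keys d v).1 (by simpa using hne)
        rw [hkeys, PySem.List.mem_dedup] at this
        exact h this
      rw [pvStep]
      simp only [hc, Bool.false_eq_true, if_false, if_neg h]
      rw [PySem.Dict.items_insert_of_not_contains d _ hc, ih, List.map_append]
      congr 1
      · simp only [shift_type_compose_alt]
        apply List.map_congr_left
        intro t ht
        have hvt : v ≠ t := fun hvt => h (hvt ▸ (PySem.List.mem_dedup _ _).1 ht)
        simp [hvt]
      · have hfe : l.filter (fun p => p.2 == v) = [] := by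
          rw [List.filter_eq_nil_iff]
          intro p hp
          simp only [beq_iff_eq]
          intro hpv
          exact h (hpv ▸ List.mem_map_of_mem hp)
        simp [hfe]

-- ===== VERDICT (by name: the statement is the Claim_ definition above) =====
theorem shift_type_compose_spec : Claim_equal_shift_type_compose := by
  intro l _
  show shift_type_compose l = shift_type_compose_alt l
  exact pvInv l
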